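-- pv_equiv track=rewrite | github.com/wuwei00-afk/Dodeca | TIGR_Bio_Integration (1).py | _check_homology
-- ===== SOURCE A (Python) =====
-- def _check_homology(seq1: str, seq2: str) -> bool:
--     """Check for sequence homology between two sequences."""
--     # Simple check: no more than 10 consecutive matches
--     matches = 0
--     for a, b in zip(seq1, seq2):
--         if a == b:
--             matches += 1
--             if matches > 10:
--                 return False
--         else:
--             matches = 0
--     return True
-- ===== SOURCE B (Python) =====
-- from itertools import groupby
--
-- def _check_homology(seq1: str, seq2: str) -> bool:
--     """Check for sequence homology between two sequences."""
--     # No run of more than 10 consecutive matching positions.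
--     return not any(is_match and sum(1 for _ in run) > 10
--                    for is_match, run in groupby(a == b for a, b in zip(seq1, seq2)))
-- ===== Notes on version B (the rewrite author's own statement) =====
-- stated objective: idiomatic
-- what changed: Replaces the manually reset match counter and early return with an itertools.groupby pass over per-position match flags, rejecting if any matching run exceeds 10.
import Mathlib
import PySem

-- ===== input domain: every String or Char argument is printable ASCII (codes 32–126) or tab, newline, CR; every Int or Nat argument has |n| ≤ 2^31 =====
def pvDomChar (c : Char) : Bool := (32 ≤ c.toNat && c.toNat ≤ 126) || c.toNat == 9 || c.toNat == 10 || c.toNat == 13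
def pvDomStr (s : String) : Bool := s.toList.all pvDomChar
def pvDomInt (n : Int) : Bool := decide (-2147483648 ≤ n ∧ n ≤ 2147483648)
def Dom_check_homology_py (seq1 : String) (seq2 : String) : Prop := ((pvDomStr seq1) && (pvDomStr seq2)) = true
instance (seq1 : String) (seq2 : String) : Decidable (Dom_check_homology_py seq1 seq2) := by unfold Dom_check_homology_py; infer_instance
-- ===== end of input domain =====

-- B replaces A's manually reset counter with a groupby pass over match flags (idiomatic decomposition, same cost).

-- ===== PORT A =====
-- A's loop: counter of consecutive matches, early return False when it exceeds 10.
def chkLoopA : List (Char × Char) → Nat → Bool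
  | [], _ => true
  | (a, b) :: rest, m =>
      if a == b then
        if m + 1 > 10 then false else chkLoopA rest (m + 1)
      else
        chkLoopA rest 0

def check_homology_py (seq1 : String) (seq2 : String) : Bool :=
  chkLoopA (seq1.toList.zip seq2.toList) 0

-- ===== PORT B =====
-- itertools.groupby on the flag stream: consume the current run, then group the remainder.
def takeRunB (x : Bool) : List Bool → Nat × List Bool
  | [] => (0, [])
  | y :: ys =>
      if y == x then
        let (n, rest) := takeRunB x ys
        (n + 1, rest)
      else (0, y :: ys)

theorem takeRunB_len (x : Bool) : ∀ xs : List Bool, (takeRunB x xs).2.length ≤ xs.length := by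
  intro xs
  induction xs with
  | nil => simp [takeRunB]
  | cons y ys ih =>
      simp only [takeRunB]
      split
      · simpa using Nat.le_succ_of_le ih
      · simp

def groupsB : List Bool → List (Bool × Nat)
  | [] => []
  | x :: xs =>
      let p := takeRunB x xs
      (x, p.1 + 1) :: groupsB p.2
termination_by l => l.length
decreasing_by
  exact Nat.lt_succ_of_le (takeRunB_len x xs)

def check_homology_py_alt (seq1 : String) (seq2 : String) : Bool :=
  let flags := (seq1.toList.zip seq2.toList).map (fun p => p.1 == p.2)
  !((groupsB flags).any (fun g => g.1 && decide (g.2 > 10)))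

-- ===== PRECONDITION & SPEC =====
def Spec_check_homology_py (seq1 : String) (seq2 : String) (out : Bool) : Prop := out = check_homology_py_alt seq1 seq2
instance (seq1 : String) (seq2 : String) (out : Bool) : Decidable (Spec_check_homology_py seq1 seq2 out) := by unfold Spec_check_homology_py; infer_instance

-- ===== CLAIM (what is proved, stated in full; the proofs are below) =====
def Claim_equal_check_homology_py : Prop := ∀ (seq1 : String) (seq2 : String), Dom_check_homology_py seq1 seq2 → Spec_check_homology_py seq1 seq2 (check_homology_py seq1 seq2)

-- ===== LEMMAS AND PROOFS =====

-- A's loop seen on the flag list (matches chkLoopA through List.map).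
def chkF : List Bool → Nat → Bool
  | [], _ => true
  | true :: rest, m => if m + 1 > 10 then false else chkF rest (m + 1)
  | false :: rest, _ => chkF rest 0

theorem chkLoopA_eq_chkF : ∀ (ps : List (Char × Char)) (m : Nat),
    chkLoopA ps m = chkF (ps.map fun p => p.1 == p.2) m := by
  intro ps
  induction ps with
  | nil => intro m; simp [chkLoopA, chkF]
  | cons p rest ih =>
      intro m
      obtain ⟨a, b⟩ := p
      by_cases h : a == b <;> simp [chkLoopA, chkF, h, ih]

theorem takeRunB_rest (x : Bool) : ∀ xs : List Bool,
    (takeRunB x xs).2 = [] ∨ ∃ ys, (takeRunB x xs).2 = (!x) :: ys := by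
  intro xs
  induction xs with
  | nil => left; rfl
  | cons y ys ih =>
      by_cases h : y = x
      · subst h
        simpa [takeRunB] using ih
      · right
        refine ⟨ys, ?_⟩
        have hx : y = !x := by cases x <;> cases y <;> simp_all
        simp [takeRunB, hx]

theorem chkF_reset (rest : List Bool) (m : Nat)
    (h : rest = [] ∨ ∃ ys, rest = false :: ys) : chkF rest m = chkF rest 0 := by
  rcases h with h | ⟨ys, h⟩ <;> subst h <;> simp [chkF]

theorem chkF_true_run : ∀ (xs : List Bool) (m : Nat), m ≤ 10 →
    chkF xs m = (if m + (takeRunB true xs).1 > 10 then false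
                 else chkF (takeRunB true xs).2 (m + (takeRunB true xs).1)) := by
  intro xs
  induction xs with
  | nil =>
      intro m hm
      simp [takeRunB, chkF]
      omega
  | cons y ys ih =>
      intro m hm
      cases y with
      | false =>
          simp [takeRunB, chkF]
          intro h; omega
      | true =>
          simp only [takeRunB, beq_self_eq_true, if_true, chkF]
          by_cases h : m + 1 > 10
          · have : m + ((takeRunB true ys).1 + 1) > 10 := by omega
            simp [h, this]
          · have hm1 : m + 1 ≤ 10 := by omega
            rw [if_neg h, ih (m + 1) hm1]
            have : m + 1 + (takeRunB true ys).1 = m + ((takeRunB true ys).1 + 1) := by omega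
            simp [this]

theorem chkF_false_run : ∀ xs : List Bool,
    chkF xs 0 = chkF (takeRunB false xs).2 0 := by
  intro xs
  induction xs with
  | nil => rfl
  | cons y ys ih =>
      cases y with
      | true => simp [takeRunB]
      | false => simpa [takeRunB, chkF] using ih

theorem chkF_eq_groups : ∀ xs : List Bool,
    chkF xs 0 = !((groupsB xs).any (fun g => g.1 && decide (g.2 > 10))) := by
  intro xs
  induction hn : xs.length using Nat.strong_induction_on generalizing xs with
  | _ n ih =>
    cases xs with
    | nil => simp [chkF, groupsB]
    | cons x ys =>
      subst hn
      rw [groupsB]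
      cases x with
      | false =>
          have hrest := takeRunB_len false ys
          rw [List.any_cons]
          simp only [Bool.false_and, Bool.false_or]
          rw [show chkF (false :: ys) 0 = chkF ys 0 from rfl, chkF_false_run ys]
          exact ih (takeRunB false ys).2.length (by simpa using Nat.lt_succ_of_le hrest)
            (takeRunB false ys).2 rfl
      | true =>
          have hrest := takeRunB_len true ys
          rw [List.any_cons]
          have hstep : chkF (true :: ys) 0 = chkF ys 1 := by simp [chkF]
          rw [hstep, chkF_true_run ys 1 (by omega)]
          have hreset : chkF (takeRunB true ys).2 (1 + (takeRunB true ys).1)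
              = chkF (takeRunB true ys).2 0 := by
            apply chkF_reset
            simpa using takeRunB_rest true ys
          rw [hreset]
          have hihr : chkF (takeRunB true ys).2 0
              = !((groupsB (takeRunB true ys).2).any (fun g => g.1 && decide (g.2 > 10))) :=
            ih (takeRunB true ys).2.length (by simpa using Nat.lt_succ_of_le hrest)
              (takeRunB true ys).2 rfl
          by_cases h : (takeRunB true ys).1 + 1 > 10
          · have h' : 1 + (takeRunB true ys).1 > 10 := by omega
            simp [h, h']
          · have h' : ¬ (1 + (takeRunB true ys).1 > 10) := by omega
            simp [h, h', hihr]

-- ===== VERDICT (by name: the statement is the Claim_ definition above) =====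
theorem check_homology_py_spec : Claim_equal_check_homology_py := by
  intro seq1 seq2 _
  unfold Spec_check_homology_py check_homology_py check_homology_py_alt
  rw [chkLoopA_eq_chkF, chkF_eq_groups]
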